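-- pv_equiv track=rewrite | github.com/hirame6548/python | AtCoder_Beginner_Contest_447/C/main.py | A_count
-- ===== SOURCE A (Python) =====
-- def A_count(S):
--     counter = 0
--     ans = []
--     for s in S:
--         if s == "A":
--             counter += 1
--         else:
--             ans.append(counter)
--             counter = 0
--     ans.append(counter)
--     return ans
-- ===== SOURCE B (Python) =====
-- def A_count(S):
--     n = len(S)
--     ans = []
--     i = 0
--     while True:
--         j = i
--         while j < n and S[j] == "A":
--             j += 1
--         ans.append(j - i)
--         if j == n:
--             return ans
--         i = j + 1
-- ===== Notes on version B (the rewrite author's own statement) =====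
-- stated objective: alternative
-- what changed: Replaced the char-by-char counter/reset accumulator loop with a run-at-a-time scan: an inner loop measures each maximal run of 'A' by advancing an index, the outer loop appends the run length and jumps past the delimiter.
import Mathlib
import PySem

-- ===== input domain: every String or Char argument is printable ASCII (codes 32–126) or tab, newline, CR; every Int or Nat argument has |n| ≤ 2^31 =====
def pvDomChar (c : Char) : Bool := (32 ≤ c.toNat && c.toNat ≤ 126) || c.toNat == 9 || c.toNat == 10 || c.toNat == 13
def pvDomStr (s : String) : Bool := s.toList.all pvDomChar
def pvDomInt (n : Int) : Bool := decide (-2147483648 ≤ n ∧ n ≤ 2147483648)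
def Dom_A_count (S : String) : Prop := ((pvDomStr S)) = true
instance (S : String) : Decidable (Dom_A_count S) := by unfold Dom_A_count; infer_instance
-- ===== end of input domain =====

-- B replaces A's counter/reset loop with a run-at-a-time scan (measure each 'A' run, jump past the delimiter); objective: alternative (same cost).

-- ===== PORT A =====
-- counter/reset loop over the characters, appending on each delimiter, then the trailing counter
def A_count (S : String) : List Int :=
  let st := S.toList.foldl
    (fun (st : Int × List Int) s =>
      if s == 'A' then (st.1 + 1, st.2) else (0, st.2 ++ [st.1]))
    (0, [])
  st.2 ++ [st.1]

-- ===== PORT B =====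
-- outer while loop: 'cs' is the remaining suffix S[i:], 'ans' the pieces appended so far;
-- the inner while loop that advances j over the 'A' run is the takeWhile-length, j - i = run
def A_count_alt_go (cs : List Char) (ans : List Int) : List Int :=
  let run := (cs.takeWhile (fun c => c == 'A')).length
  if run = cs.length then ans ++ [(run : Int)]
  else A_count_alt_go (cs.drop (run + 1)) (ans ++ [(run : Int)])
termination_by cs.length
decreasing_by
  have hle : run ≤ cs.length := (List.takeWhile_sublist _).length_le
  simp only [List.length_drop]
  omega

def A_count_alt (S : String) : List Int := A_count_alt_go S.toList []

-- ===== PRECONDITION & SPEC =====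
def Spec_A_count (S : String) (out : List Int) : Prop := out = A_count_alt S
instance (S : String) (out : List Int) : Decidable (Spec_A_count S out) := by unfold Spec_A_count; infer_instance

-- ===== CLAIM (what is proved, stated in full; the proofs are below) =====
def Claim_equal_A_count : Prop := ∀ (S : String), Dom_A_count S → Spec_A_count S (A_count S)

-- ===== LEMMAS AND PROOFS =====

-- B's scan with a starting offset added to the first piece (proof helper)
def bgo (cs : List Char) (c : Int) (ans : List Int) : List Int :=
  let run := (cs.takeWhile (fun c => c == 'A')).length
  if run = cs.length then ans ++ [c + (run : Int)]
  else A_count_alt_go (cs.drop (run + 1)) (ans ++ [c + (run : Int)])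
termination_by cs.length

lemma bgo_zero (cs : List Char) (ans : List Int) : bgo cs 0 ans = A_count_alt_go cs ans := by
  conv_rhs => rw [A_count_alt_go]
  rw [bgo]
  simp

lemma bgo_cons_A (t : List Char) (c : Int) (ans : List Int) :
    bgo ('A' :: t) c ans = bgo t (c + 1) ans := by
  rw [bgo, bgo]
  have hle : (t.takeWhile (fun c => c == 'A')).length ≤ t.length :=
    (List.takeWhile_sublist _).length_le
  simp only [List.takeWhile_cons, beq_self_eq_true, if_true, List.length_cons,
    List.drop_succ_cons]
  split_ifs with h1 h2 h2
  · push_cast; ring_nf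
  · omega
  · omega
  · push_cast; ring_nf

lemma bgo_cons_ne (x : Char) (t : List Char) (c : Int) (ans : List Int)
    (hx : (x == 'A') = false) :
    bgo (x :: t) c ans = A_count_alt_go t (ans ++ [c]) := by
  rw [bgo]
  simp [hx]

lemma foldl_eq_bgo (cs : List Char) : ∀ (counter : Int) (ans : List Int),
    (cs.foldl (fun (st : Int × List Int) s =>
        if s == 'A' then (st.1 + 1, st.2) else (0, st.2 ++ [st.1])) (counter, ans)).2
      ++ [(cs.foldl (fun (st : Int × List Int) s =>
        if s == 'A' then (st.1 + 1, st.2) else (0, st.2 ++ [st.1])) (counter, ans)).1]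
    = bgo cs counter ans := by
  induction cs with
  | nil => intro counter ans; simp [bgo]
  | cons x t ih =>
    intro counter ans
    by_cases hx : x = 'A'
    · subst hx
      simp only [List.foldl_cons, if_pos rfl, bgo_cons_A]
      exact ih (counter + 1) ans
    · have hx' : (x == 'A') = false := by simp [hx]
      simp only [List.foldl_cons, hx', Bool.false_eq_true, if_false]
      rw [ih 0 (ans ++ [counter]), bgo_cons_ne x t counter ans hx', bgo_zero]

-- ===== VERDICT (by name: the statement is the Claim_ definition above) =====
theorem A_count_spec : Claim_equal_A_count := by
  intro S _
  unfold Spec_A_count A_count A_count_alt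
  simpa [bgo_zero] using foldl_eq_bgo S.toList 0 []
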